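-- pv_equiv track=rewrite | github.com/roed314/seminars | seminars/utils.py | num_columns
-- ===== SOURCE A (Python) =====
-- def num_columns(labels):
--     if not labels:
--         return 1
--     mlen = max(len(label) for label in labels)
--     # The following are guesses that haven't been tuned much.
--     if mlen > 50:
--         return 1
--     elif mlen > 34:
--         return 2
--     elif mlen > 20:
--         return 3
--     elif mlen > 16:
--         return 4
--     elif mlen > 10:
--         return 5
--     else:
--         return 6
-- ===== SOURCE B (Python) =====
-- # Columns per label length, precomputed once: index = length (0..50), beyond -> 1.
-- _COLS = [6] * 11 + [5] * 6 + [4] * 4 + [3] * 14 + [2] * 16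
--
-- def num_columns(labels):
--     if not labels:
--         return 1
--     # min over per-label column counts; valid because columns(len) is non-increasing
--     return min(_COLS[len(l)] if len(l) <= 50 else 1 for l in labels)
-- ===== Notes on version B (the rewrite author's own statement) =====
-- stated objective: alternative
-- what changed: Instead of taking the max length and running it through a threshold cascade, B maps each label directly to a column count via a precomputed length-indexed lookup table and takes the minimum over labels (correct since the column count is non-increasing in length).
import Mathlib
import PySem

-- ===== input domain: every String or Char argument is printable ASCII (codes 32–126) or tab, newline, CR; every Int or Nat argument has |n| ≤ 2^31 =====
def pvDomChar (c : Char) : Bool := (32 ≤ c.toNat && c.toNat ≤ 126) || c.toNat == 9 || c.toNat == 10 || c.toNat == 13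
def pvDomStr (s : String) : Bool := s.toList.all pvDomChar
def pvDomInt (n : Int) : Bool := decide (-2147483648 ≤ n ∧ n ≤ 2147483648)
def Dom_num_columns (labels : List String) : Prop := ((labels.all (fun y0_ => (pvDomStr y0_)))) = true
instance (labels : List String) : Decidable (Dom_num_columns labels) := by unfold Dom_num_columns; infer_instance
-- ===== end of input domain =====

-- ===== PORT A =====
-- B maps each label through a precomputed length-indexed column table and takes the min,
-- instead of A's max length fed through a threshold cascade (alternative; same cost).
def num_columns (labels : List String) : Int :=
  if labels = [] then 1
  else
    match PySem.List.max? (labels.map PySem.Str.len) (fun x => x) with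
    | none => 1  -- unreachable: labels ≠ []
    | some mlen =>
      if mlen > 50 then 1
      else if mlen > 34 then 2
      else if mlen > 20 then 3
      else if mlen > 16 then 4
      else if mlen > 10 then 5
      else 6

-- ===== PORT B =====
def pvCols : List Int :=
  List.replicate 11 6 ++ List.replicate 6 5 ++ List.replicate 4 4 ++
  List.replicate 14 3 ++ List.replicate 16 2

def pvColOf (l : String) : Int :=
  if PySem.Str.len l ≤ 50 then (PySem.List.pyGet? pvCols (PySem.Str.len l)).getD 1 else 1

def num_columns_alt (labels : List String) : Int :=
  if labels = [] then 1
  else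
    match PySem.List.min? (labels.map pvColOf) (fun x => x) with
    | none => 1  -- unreachable: labels ≠ []
    | some c => c

-- ===== PRECONDITION & SPEC =====
def Spec_num_columns (labels : List String) (out : Int) : Prop := out = num_columns_alt labels
instance (labels : List String) (out : Int) : Decidable (Spec_num_columns labels out) := by unfold Spec_num_columns; infer_instance

-- ===== CLAIM (what is proved, stated in full; the proofs are below) =====
def Claim_equal_num_columns : Prop := ∀ (labels : List String), Dom_num_columns labels → Spec_num_columns labels (num_columns labels)

-- ===== LEMMAS AND PROOFS =====

-- A's threshold cascade as a function of the max length
def pvCascade (n : Int) : Int :=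
  if n > 50 then 1
  else if n > 34 then 2
  else if n > 20 then 3
  else if n > 16 then 4
  else if n > 10 then 5
  else 6

-- table lookup agrees with the cascade on nonnegative lengths
theorem pvColF_eq_cascade (n : Int) (hn : 0 ≤ n) :
    (if n ≤ 50 then (PySem.List.pyGet? pvCols n).getD 1 else 1) = pvCascade n := by
  by_cases h : n ≤ 50
  · obtain ⟨m, rfl⟩ := Int.eq_ofNat_of_zero_le hn
    have hm : m ≤ 50 := by exact_mod_cast h
    interval_cases m <;> decide
  · simp [pvCascade, h, show n > 50 from by omega]

theorem pvCascade_antitone (a b : Int) (h : a ≤ b) : pvCascade b ≤ pvCascade a := by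
  unfold pvCascade; split_ifs <;> omega

theorem pvCascade_max (a b : Int) : pvCascade (max a b) = min (pvCascade a) (pvCascade b) := by
  rcases le_total a b with h | h
  · rw [max_eq_right h, min_eq_right (pvCascade_antitone a b h)]
  · rw [max_eq_left h, min_eq_left (pvCascade_antitone b a h)]

theorem pvFold_min_max (t : List Int) : ∀ x : Int,
    (t.map pvCascade).foldl min (pvCascade x) = pvCascade (t.foldl max x) := by
  induction t with
  | nil => intro x; rfl
  | cons a t ih =>
    intro x
    simp only [List.map_cons, List.foldl_cons, ← pvCascade_max, ih]

theorem pvColOf_eq (l : String) : pvColOf l = pvCascade (PySem.Str.len l) := by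
  have hn : 0 ≤ PySem.Str.len l := by simp [PySem.Str.len_eq]
  simpa [pvColOf] using pvColF_eq_cascade (PySem.Str.len l) hn

-- ===== VERDICT (by name: the statement is the Claim_ definition above) =====
theorem num_columns_spec : Claim_equal_num_columns := by
  unfold Claim_equal_num_columns
  intro labels _
  unfold Spec_num_columns num_columns num_columns_alt
  cases labels with
  | nil => rfl
  | cons a t =>
    simp only [List.map_cons, PySem.List.max?_id_cons, PySem.List.min?_id_cons,
      if_false, reduceCtorEq]
    have : (t.map pvColOf) = (t.map PySem.Str.len).map pvCascade := by
      simp [List.map_map, Function.comp, pvColOf_eq]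
    rw [pvColOf_eq, this, pvFold_min_max]
    rfl
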